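-- pv_equiv track=rewrite | github.com/kharybdys/adventOfCode2023 | puzzle8/analyzer.py | generate_possible_instructions
-- ===== SOURCE A (Python) =====
-- from collections import deque, namedtuple, defaultdict
-- from dataclasses import field, dataclass
-- from typing import Generator
--
-- @dataclass
-- class PartialInstruction:
--     instr: str
--     start_positions: list[int] = field(default_factory=list)
--
-- def position_wrapped(position: int, wrap_at: int) -> int:
--     return position % wrap_at
--
-- def generate_possible_instructions(instructions: str, max_length: int) -> Generator[str, None, None]:
--     partial_instructions = deque()
--     partial_instructions.append(PartialInstruction(instr="R", start_positions=[index for index, char in enumerate(instructions) if char == "R"]))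
--     partial_instructions.append(PartialInstruction(instr="L", start_positions=[index for index, char in enumerate(instructions) if char == "L"]))
--     while partial_instructions:
--         partial_instruction = partial_instructions.pop()
--         yield partial_instruction.instr
--         if len(partial_instruction.instr) < max_length:
--             if len(partial_instruction.start_positions) == 1:
--                 yield from extend_partial_instruction(partial_instruction, instructions, max_length)
--             else:
--                 next_instructions_dict = defaultdict(list)
--                 for start_position in partial_instruction.start_positions:
--                     next_char = instructions[position_wrapped(start_position + len(partial_instruction.instr) + 1, len(instructions))]
--                     next_instructions_dict[next_char].append(start_position)
--                 for next_char, start_positions in next_instructions_dict.items():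
--                     partial_instructions.append(PartialInstruction(instr=partial_instruction.instr + next_char, start_positions=start_positions))
--
-- def extend_partial_instruction(partial_instruction: PartialInstruction, instructions: str, max_length: int):
--     instruction = partial_instruction.instr
--     for i in range(len(partial_instruction.instr), max_length + 1):
--         instruction += instructions[position_wrapped(partial_instruction.start_positions[0] + i, len(instructions))]
--         yield instruction
-- ===== SOURCE B (Python) =====
-- def generate_possible_instructions(instructions, max_length):
--     # Recursive-generator decomposition of A's explicit deque DFS; same yields, same order.
--     n = len(instructions)
--
--     def gen(instr, positions):
--         yield instr
--         if len(instr) >= max_length: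
--             return
--         if len(positions) == 1:
--             cur = instr
--             for i in range(len(instr), max_length + 1):
--                 cur += instructions[(positions[0] + i) % n]
--                 yield cur
--         else:
--             buckets = {}
--             for sp in positions:
--                 c = instructions[(sp + len(instr) + 1) % n]
--                 buckets.setdefault(c, []).append(sp)
--             for c, ps in reversed(buckets.items()):
--                 yield from gen(instr + c, ps)
--
--     yield from gen("L", [i for i, ch in enumerate(instructions) if ch == "L"])
--     yield from gen("R", [i for i, ch in enumerate(instructions) if ch == "R"])
-- ===== Notes on version B (the rewrite author's own statement) =====
-- stated objective: simpler
-- what changed: Replaced the explicit deque/stack DFS over PartialInstruction records with a recursive generator that yields the partial instruction and recurses into the next-character buckets in reversed insertion order (L-partial first), producing the identical yield sequence.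
import Mathlib
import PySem

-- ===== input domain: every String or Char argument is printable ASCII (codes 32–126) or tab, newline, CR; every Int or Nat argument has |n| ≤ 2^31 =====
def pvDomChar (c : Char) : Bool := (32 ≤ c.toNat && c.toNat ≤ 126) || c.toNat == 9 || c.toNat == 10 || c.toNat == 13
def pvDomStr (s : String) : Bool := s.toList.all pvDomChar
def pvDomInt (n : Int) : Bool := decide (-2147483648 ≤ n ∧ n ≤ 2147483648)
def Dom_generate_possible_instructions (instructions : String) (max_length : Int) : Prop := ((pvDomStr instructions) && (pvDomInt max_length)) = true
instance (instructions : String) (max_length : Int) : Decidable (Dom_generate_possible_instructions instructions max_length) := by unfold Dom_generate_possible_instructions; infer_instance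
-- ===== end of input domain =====

-- B replaces A's explicit deque/stack DFS by a recursive generator over position buckets
-- (same yields in the same order); objective: simpler decomposition, no speed claim.
-- Both Pythons are generators; equivalence is about the yielded sequence (as a list).

-- ===== PORT A =====
-- instructions[position_wrapped(i, len(instructions))]: Python i % n (n > 0 at every
-- reached call since the position list is nonempty there); the getD default is never hit.
def pvWrapA (cs : List Char) (i : Int) : Char :=
  cs.getD (PySem.Int.mod i (cs.length : Int)).toNat ' '

-- [index for index, char in enumerate(instructions) if char == c]
def pvPositionsA (cs : List Char) (c : Char) : List Int :=
  (PySem.List.enumerate cs).filterMap (fun e => if e.2 = c then some e.1 else none)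

-- extend_partial_instruction: accumulate instruction, yield after each appended char
def pvExtendA (cs : List Char) (maxLen : Int) (instr : List Char) (start : Int) : List String :=
  ((PySem.List.pyRange (instr.length : Int) (maxLen + 1) 1).foldl
    (fun st i =>
      let ins := st.1 ++ [pvWrapA cs (start + i)]
      (ins, st.2 ++ [String.mk ins]))
    (instr, ([] : List String))).2

-- defaultdict(list): insertion-ordered association list, d[c].append(sp)
def pvBucketAddA (d : List (Char × List Int)) (c : Char) (sp : Int) : List (Char × List Int) :=
  match d with
  | [] => [(c, [sp])]
  | (k, v) :: t => if k = c then (k, v ++ [sp]) :: t else (k, v) :: pvBucketAddA t c sp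

-- the next_instructions_dict loop
def pvBucketsA (cs : List Char) (instr : List Char) (positions : List Int) : List (Char × List Int) :=
  positions.foldl (fun d sp => pvBucketAddA d (pvWrapA cs (sp + (instr.length : Int) + 1)) sp) []

-- termination measure for the stack loop
def pvDepth (maxLen : Int) (instr : List Char) : Nat := (maxLen - (instr.length : Int)).toNat
def pvW (maxLen : Int) (stack : List (List Char × List Int)) : Nat :=
  (stack.map (fun e => (e.2.length + 1) * 2 ^ pvDepth maxLen e.1)).sum

def pvWsum (d : List (Char × List Int)) : Nat := (d.map (fun e => e.2.length + 1)).sum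

theorem pvWsum_bucketAdd (d : List (Char × List Int)) (c : Char) (sp : Int) :
    pvWsum (pvBucketAddA d c sp) ≤ pvWsum d + 2 := by
  induction d with
  | nil => simp [pvBucketAddA, pvWsum]
  | cons h t ih =>
    obtain ⟨k, v⟩ := h
    by_cases hk : k = c <;> simp [pvBucketAddA, hk, pvWsum] at ih ⊢ <;> omega

theorem pvWsum_buckets (cs : List Char) (instr : List Char) (positions : List Int) :
    pvWsum (pvBucketsA cs instr positions) ≤ 2 * positions.length := by
  suffices h : ∀ (ps : List Int) (d : List (Char × List Int)),
      pvWsum (ps.foldl (fun d sp => pvBucketAddA d (pvWrapA cs (sp + (instr.length : Int) + 1)) sp) d)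
        ≤ pvWsum d + 2 * ps.length by
    have := h positions []
    simpa [pvBucketsA, pvWsum] using this
  intro ps
  induction ps with
  | nil => simp
  | cons p t ih =>
    intro d
    have h1 := pvWsum_bucketAdd d (pvWrapA cs (p + (instr.length : Int) + 1)) p
    have h2 := ih (pvBucketAddA d (pvWrapA cs (p + (instr.length : Int) + 1)) p)
    simp only [List.foldl_cons, List.length_cons]
    omega

theorem pvW_children_lt (cs : List Char) (maxLen : Int) (instr : List Char)
    (positions : List Int) (rest : List (List Char × List Int))
    (h : (instr.length : Int) < maxLen) :
    pvW maxLen (((pvBucketsA cs instr positions).map (fun e => (instr ++ [e.1], e.2))).reverse ++ rest)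
      < pvW maxLen ((instr, positions) :: rest) := by
  have hd : 1 ≤ pvDepth maxLen instr := by unfold pvDepth; omega
  have hdep : ∀ c : Char, pvDepth maxLen (instr ++ [c]) = pvDepth maxLen instr - 1 := by
    intro c; unfold pvDepth; simp; omega
  have hkey : (((pvBucketsA cs instr positions).map (fun e => (instr ++ [e.1], e.2))).map
        (fun e => (e.2.length + 1) * 2 ^ pvDepth maxLen e.1)).sum
      = pvWsum (pvBucketsA cs instr positions) * 2 ^ (pvDepth maxLen instr - 1) := by
    rw [List.map_map]
    have hmc : (pvBucketsA cs instr positions).map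
          ((fun e : List Char × List Int => (e.2.length + 1) * 2 ^ pvDepth maxLen e.1)
            ∘ (fun e => (instr ++ [e.1], e.2)))
        = (pvBucketsA cs instr positions).map
            (fun e => (e.2.length + 1) * 2 ^ (pvDepth maxLen instr - 1)) := by
      apply List.map_congr_left; intro e _
      simp [Function.comp, hdep e.1]
    rw [hmc]
    unfold pvWsum
    exact List.sum_map_mul_right _ _ _
  have hb := pvWsum_buckets cs instr positions
  have hpow : 2 ^ pvDepth maxLen instr = 2 * 2 ^ (pvDepth maxLen instr - 1) := by
    conv_lhs => rw [show pvDepth maxLen instr = (pvDepth maxLen instr - 1) + 1 by omega]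
    ring
  have hpos : 0 < 2 ^ (pvDepth maxLen instr - 1) := Nat.pow_pos (by norm_num)
  unfold pvW
  simp only [List.map_append, List.map_reverse, List.sum_append, List.sum_reverse,
    List.map_cons, List.sum_cons]
  rw [hkey]
  have hle : pvWsum (pvBucketsA cs instr positions) * 2 ^ (pvDepth maxLen instr - 1)
      ≤ 2 * positions.length * 2 ^ (pvDepth maxLen instr - 1) := Nat.mul_le_mul_right _ hb
  have hlt : 2 * positions.length * 2 ^ (pvDepth maxLen instr - 1)
      < (positions.length + 1) * 2 ^ pvDepth maxLen instr := by
    rw [hpow]; nlinarith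
  omega

-- the while loop over the deque (stack head = deque's right end = next pop)
def pvRunA (cs : List Char) (maxLen : Int) (stack : List (List Char × List Int)) : List String :=
  match stack with
  | [] => []
  | (instr, positions) :: rest =>
    if h : (instr.length : Int) < maxLen then
      if positions.length = 1 then
        -- positions[0]: guarded by length = 1, the headD default is never hit
        String.mk instr :: (pvExtendA cs maxLen instr (positions.headD 0) ++ pvRunA cs maxLen rest)
      else
        String.mk instr ::
          pvRunA cs maxLen
            (((pvBucketsA cs instr positions).map (fun e => (instr ++ [e.1], e.2))).reverse ++ rest)
    else
      String.mk instr :: pvRunA cs maxLen rest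
termination_by pvW maxLen stack
decreasing_by
  all_goals first
    | exact pvW_children_lt cs maxLen instr positions rest h
    | (unfold pvW; simp)

def generate_possible_instructions (instructions : String) (max_length : Int) : List String :=
  let cs := instructions.toList
  -- deque: append R-partial then L-partial; pop() takes the L-partial first
  pvRunA cs max_length [(['L'], pvPositionsA cs 'L'), (['R'], pvPositionsA cs 'R')]

-- ===== PORT B =====
def pvWrapB (cs : List Char) (i : Int) : Char :=
  cs.getD (PySem.Int.mod i (cs.length : Int)).toNat ' '

def pvPositionsB (cs : List Char) (c : Char) : List Int :=
  (PySem.List.enumerate cs).filterMap (fun e => if e.2 = c then some e.1 else none)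

-- the single-position extension loop of gen
def pvExtendB (cs : List Char) (maxLen : Int) (instr : List Char) (start : Int) : List String :=
  ((PySem.List.pyRange (instr.length : Int) (maxLen + 1) 1).foldl
    (fun st i =>
      let ins := st.1 ++ [pvWrapB cs (start + i)]
      (ins, st.2 ++ [String.mk ins]))
    (instr, ([] : List String))).2

-- buckets.setdefault(c, []).append(sp): insertion-ordered association list
def pvBucketAddB (d : List (Char × List Int)) (c : Char) (sp : Int) : List (Char × List Int) :=
  match d with
  | [] => [(c, [sp])]
  | (k, v) :: t => if k = c then (k, v ++ [sp]) :: t else (k, v) :: pvBucketAddB t c sp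

def pvBucketsB (cs : List Char) (instr : List Char) (positions : List Int) : List (Char × List Int) :=
  positions.foldl (fun d sp => pvBucketAddB d (pvWrapB cs (sp + (instr.length : Int) + 1)) sp) []

-- the recursive generator gen(instr, positions)
def pvGenB (cs : List Char) (maxLen : Int) (instr : List Char) (positions : List Int) : List String :=
  String.mk instr ::
    (if h : (instr.length : Int) < maxLen then
      if positions.length = 1 then
        pvExtendB cs maxLen instr (positions.headD 0)
      else
        ((pvBucketsB cs instr positions).reverse).flatMap
          (fun e => pvGenB cs maxLen (instr ++ [e.1]) e.2)
    else [])
termination_by pvDepth maxLen instr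
decreasing_by unfold pvDepth; simp; omega

def generate_possible_instructions_alt (instructions : String) (max_length : Int) : List String :=
  let cs := instructions.toList
  pvGenB cs max_length ['L'] (pvPositionsB cs 'L') ++ pvGenB cs max_length ['R'] (pvPositionsB cs 'R')

-- ===== PRECONDITION & SPEC =====
def Spec_generate_possible_instructions (instructions : String) (max_length : Int) (out : List String) : Prop := out = generate_possible_instructions_alt instructions max_length
instance (instructions : String) (max_length : Int) (out : List String) : Decidable (Spec_generate_possible_instructions instructions max_length out) := by unfold Spec_generate_possible_instructions; infer_instance

-- ===== CLAIM (what is proved, stated in full; the proofs are below) =====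
def Claim_equal_generate_possible_instructions : Prop := ∀ (instructions : String) (max_length : Int), Dom_generate_possible_instructions instructions max_length → Spec_generate_possible_instructions instructions max_length (generate_possible_instructions instructions max_length)

-- ===== LEMMAS AND PROOFS =====

theorem pvBucketAdd_eq (d : List (Char × List Int)) (c : Char) (sp : Int) :
    pvBucketAddB d c sp = pvBucketAddA d c sp := by
  induction d with
  | nil => rfl
  | cons hd t ih =>
    obtain ⟨k, v⟩ := hd
    by_cases hk : k = c <;> simp [pvBucketAddA, pvBucketAddB, hk, ih]

theorem pvBuckets_eq (cs : List Char) (instr : List Char) (positions : List Int) :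
    pvBucketsB cs instr positions = pvBucketsA cs instr positions := by
  unfold pvBucketsA pvBucketsB pvWrapA pvWrapB
  congr 1
  funext d sp
  exact pvBucketAdd_eq _ _ _

theorem pvRunA_eq_flatMap (cs : List Char) (maxLen : Int) (stack : List (List Char × List Int)) :
    pvRunA cs maxLen stack = stack.flatMap (fun e => pvGenB cs maxLen e.1 e.2) := by
  fun_induction pvRunA cs maxLen stack with
  | case1 => simp
  | case2 instr positions rest h hp ih =>
    rw [ih, List.flatMap_cons, pvGenB, dif_pos h, if_pos hp]
    simp only [List.cons_append]
    rfl
  | case3 instr positions rest h hp ih =>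
    rw [ih, List.flatMap_cons, pvGenB, dif_pos h, if_neg hp]
    simp only [List.flatMap_append, List.cons_append]
    congr 1
    rw [← List.map_reverse, List.flatMap_map, pvBuckets_eq]
  | case4 instr positions rest h ih =>
    rw [ih, List.flatMap_cons, pvGenB, dif_neg h]
    simp

-- ===== VERDICT (by name: the statement is the Claim_ definition above) =====
theorem generate_possible_instructions_spec : Claim_equal_generate_possible_instructions := by
  intro instructions max_length _
  unfold Spec_generate_possible_instructions generate_possible_instructions
    generate_possible_instructions_alt
  rw [pvRunA_eq_flatMap]
  simp [pvPositionsA, pvPositionsB]
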